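-- pv_equiv track=rewrite | github.com/IntelPython/sdc | docs/source/buildscripts/sdc_doc_utils.py | is_section_title
-- ===== SOURCE A (Python) =====
-- UNDERLINE_CHARS = ['-', '`', ':', '~', '^', '_', '*', '+', '#', '<', '>']  # Characters that can underline title
--
-- def is_section_title(line, underline):
--     """
--     Checks whether line and consecutive underline form valid section title.
--
--     .. note::
--         Function expects leading and trailing whitespaces removed for both strings prior to the call.
--
--     :param line: String, title text
--     :param underline: String, underlying characters
--     :return: True if line and underline form valid section title
--     """
--
--     if line is None:
--         return False
--
--     if underline is None:
--         return False
--
--     if line == '':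
--         return False
--
--     if underline == '':
--         return False
--
--     n = len(line)
--     for c in UNDERLINE_CHARS:
--         s = c * n
--         if underline == s:
--             return True
--
--     return False
-- ===== SOURCE B (Python) =====
-- UNDERLINE_CHARS = ['-', '`', ':', '~', '^', '_', '*', '+', '#', '<', '>']  # Characters that can underline title
--
-- def is_section_title(line, underline):
--     """Checks whether line and consecutive underline form valid section title."""
--     if not line or not underline:
--         # covers None and '' for both arguments
--         return False
--     return len(set(underline)) == 1 and len(underline) == len(line) and underline[0] in UNDERLINE_CHARS
-- ===== Notes on version B (the rewrite author's own statement) =====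
-- stated objective: simpler
-- what changed: Instead of building each of the 11 candidate strings c*len(line) and comparing underline against each, B collapses underline into a set (uniformity = the set has one element) and then checks the length match and that the single character is an underline character.
import Mathlib
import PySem

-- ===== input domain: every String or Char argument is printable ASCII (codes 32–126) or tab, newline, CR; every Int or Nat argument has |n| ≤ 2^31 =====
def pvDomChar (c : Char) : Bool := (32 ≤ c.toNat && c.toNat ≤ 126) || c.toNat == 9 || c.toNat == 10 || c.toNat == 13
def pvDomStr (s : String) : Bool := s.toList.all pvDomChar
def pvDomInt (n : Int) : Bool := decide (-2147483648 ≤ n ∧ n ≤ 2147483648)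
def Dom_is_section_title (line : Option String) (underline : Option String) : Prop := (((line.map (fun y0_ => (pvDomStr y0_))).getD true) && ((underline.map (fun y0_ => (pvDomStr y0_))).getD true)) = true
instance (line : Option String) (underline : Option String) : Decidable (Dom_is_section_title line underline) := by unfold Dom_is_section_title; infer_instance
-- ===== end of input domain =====

-- B replaces A's loop over 11 built candidate strings by a set-collapse uniformity check plus length and membership tests (simpler).


def UNDERLINE_CHARS : List Char := ['-', '`', ':', '~', '^', '_', '*', '+', '#', '<', '>']

-- ===== PORT A =====
-- Four sequential guards, then the for-loop with early 'return True' ported as List.any;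
-- 'underline == c*n' ported as equality of character lists (String.toList is injective, exact).
def is_section_title (line : Option String) (underline : Option String) : Bool :=
  match line with
  | none => false
  | some l =>
    match underline with
    | none => false
    | some u =>
      if l = "" then false
      else if u = "" then false
      else
        let n := l.toList.length
        UNDERLINE_CHARS.any (fun c => u.toList = List.replicate n c)

-- ===== PORT B =====
-- 'not line or not underline' (None or '') as one combined guard; len(set(underline)) via PySem.Set.ofList;
-- underline[0] only reached when the set check guarantees nonemptiness, so headD ' ' is exact.
def is_section_title_alt (line : Option String) (underline : Option String) : Bool :=
  match line, underline with
  | some l, some u =>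
    if l = "" || u = "" then false
    else
      ((PySem.Set.ofList u.toList).length == 1)
        && (u.toList.length == l.toList.length)
        && UNDERLINE_CHARS.contains (u.toList.headD ' ')
  | _, _ => false

-- ===== PRECONDITION & SPEC =====
def Spec_is_section_title (line : Option String) (underline : Option String) (out : Bool) : Prop := out = is_section_title_alt line underline
instance (line : Option String) (underline : Option String) (out : Bool) : Decidable (Spec_is_section_title line underline out) := by unfold Spec_is_section_title; infer_instance

-- ===== CLAIM =====
def Claim_equal_is_section_title : Prop := ∀ (line : Option String) (underline : Option String), Dom_is_section_title line underline → Spec_is_section_title line underline (is_section_title line underline)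

-- ===== LEMMAS AND PROOFS =====

-- set(a::t) has exactly one element iff every element equals the head.
theorem setLen_one_iff (a : Char) (t : List Char) :
    (PySem.Set.ofList (a :: t)).length = 1 ↔ ∀ x ∈ t, x = a := by
  rw [PySem.Set.ofList_cons, List.length_cons]
  constructor
  · intro h1 x hx
    by_contra hne
    have hm : x ∈ (PySem.Set.ofList t).discard a := by
      simp [PySem.Set.mem_discard, PySem.Set.mem_ofList, hx, hne]
    have := List.length_pos_of_mem hm
    omega
  · intro h
    have hnil : (PySem.Set.ofList t).discard a = [] := by
      rw [List.eq_nil_iff_forall_not_mem]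
      intro x hx
      rw [PySem.Set.mem_discard] at hx
      exact hx.2 (h x ((PySem.Set.mem_ofList _ _).mp hx.1))
    simp [hnil]

-- A's candidate scan on a nonempty underline equals B's set/length/membership test.
theorem key_lemma (a : Char) (t : List Char) (n : Nat) :
    (UNDERLINE_CHARS.any (fun c => a :: t = List.replicate n c)) =
    (((PySem.Set.ofList (a :: t)).length == 1)
      && ((a :: t).length == n)
      && UNDERLINE_CHARS.contains a) := by
  rw [Bool.eq_iff_iff]
  simp only [List.any_eq_true, decide_eq_true_eq, Bool.and_eq_true, beq_iff_eq,
    List.eq_replicate_iff, List.contains_eq_mem, decide_eq_true_eq, setLen_one_iff]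
  constructor
  · rintro ⟨c, hc, hlen, hall⟩
    have ha : a = c := hall a (List.mem_cons_self ..)
    subst ha
    exact ⟨⟨fun x hx => hall x (List.mem_cons_of_mem _ hx), hlen⟩, hc⟩
  · rintro ⟨⟨huni, hlen⟩, ha⟩
    refine ⟨a, ha, hlen, ?_⟩
    intro x hx
    rcases List.mem_cons.mp hx with h | h
    · exact h
    · exact huni x h

-- ===== VERDICT =====
theorem is_section_title_spec : Claim_equal_is_section_title := by
  intro line underline _
  unfold Spec_is_section_title is_section_title is_section_title_alt
  cases line with
  | none => rfl
  | some l =>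
    cases underline with
    | none => rfl
    | some u =>
      by_cases hl : l = ""
      · simp [hl]
      · by_cases hu : u = ""
        · simp [hl, hu]
        · have hne : u.toList ≠ [] := by
            simpa [String.toList_eq_nil_iff] using hu
          obtain ⟨a, t, hat⟩ : ∃ a t, u.toList = a :: t := by
            cases h : u.toList with
            | nil => exact absurd h hne
            | cons a t => exact ⟨a, t, rfl⟩
          simp only [hl, hu, hat, List.headD_cons, key_lemma]
          simp
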